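-- pv_equiv track=rewrite | github.com/xico2001pt/advent-of-code | solutions/year2024/day04.py | get_overlapping_blocks
-- ===== SOURCE A (Python) =====
-- def get_overlapping_blocks(
--     values: list[list], block_size: tuple[int, int]
-- ) -> list[list[list]]:
--     num_rows = len(values)
--     num_cols = len(values[0])
--     block_height, block_width = block_size
--
--     blocks = []
--     for row in range(num_rows - block_height + 1):
--         for col in range(num_cols - block_width + 1):
--             block = [
--                 values[r][col : col + block_width]
--                 for r in range(row, row + block_height)
--             ]
--             blocks.append(block)
--
--     return blocks
-- ===== SOURCE B (Python) =====
-- def get_overlapping_blocks(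
--     values: list[list], block_size: tuple[int, int]
-- ) -> list[list[list]]:
--     num_rows = len(values)
--     num_cols = len(values[0])
--     block_height, block_width = block_size
--     nrows_out = num_rows - block_height + 1
--     if nrows_out <= 0:
--         return []
--     ncols_out = num_cols - block_width + 1
--
--     # Precompute every horizontal strip once; each strip is reused by every
--     # block that contains it.
--     strips = [
--         [row_vals[c : c + block_width] for c in range(ncols_out)]
--         for row_vals in values
--     ]
--
--     return [
--         [strips[r][col] for r in range(row, row + block_height)]
--         for row in range(nrows_out)
--         for col in range(ncols_out)
--     ]
-- ===== Notes on version B (the rewrite author's own statement) =====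
-- stated objective: alternative
-- what changed: B precomputes a table of horizontal strips (one slice per (row,col) position, shared across blocks) and assembles blocks by table lookup in a flat comprehension, instead of A's nested loops re-slicing rows inside each block.
import Mathlib
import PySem

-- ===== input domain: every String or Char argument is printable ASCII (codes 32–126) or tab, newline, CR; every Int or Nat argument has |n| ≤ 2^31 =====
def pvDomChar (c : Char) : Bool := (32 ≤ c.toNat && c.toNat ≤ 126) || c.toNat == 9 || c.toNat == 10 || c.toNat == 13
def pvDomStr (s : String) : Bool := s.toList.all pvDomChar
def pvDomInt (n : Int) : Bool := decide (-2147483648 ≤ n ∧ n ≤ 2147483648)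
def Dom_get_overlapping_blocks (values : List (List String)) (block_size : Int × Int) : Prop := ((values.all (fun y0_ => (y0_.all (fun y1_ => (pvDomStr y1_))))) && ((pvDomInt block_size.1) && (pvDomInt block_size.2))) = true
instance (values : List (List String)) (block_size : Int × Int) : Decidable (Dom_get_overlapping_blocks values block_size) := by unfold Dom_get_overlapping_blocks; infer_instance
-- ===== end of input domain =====

-- B replaces A's per-block re-slicing by a precomputed strip table looked up during block
-- assembly (alternative decomposition, same results; no speed claim).

-- ===== PORT A =====
-- Literal port of A: nested for-loops over ranges, appending one block at a time.
-- values[0] is pyGetD values 0 []; Pre_ guarantees values ≠ [], so the default is never used.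
-- values[r] is pyGetD values r []: whenever the inner range is nonempty, r is in range.
def get_overlapping_blocks (values : List (List String)) (block_size : Int × Int) : List (List (List String)) :=
  let numRows : Int := PySem.List.len values
  let numCols : Int := PySem.List.len (PySem.List.pyGetD values 0 [])
  let bh := block_size.1
  let bw := block_size.2
  (PySem.List.pyRange 0 (numRows - bh + 1) 1).foldl (fun blocks row =>
    (PySem.List.pyRange 0 (numCols - bw + 1) 1).foldl (fun blocks col =>
      blocks ++ [(PySem.List.pyRange row (row + bh) 1).map (fun r =>
        PySem.List.slice (PySem.List.pyGetD values r []) (some col) (some (col + bw)))]) blocks) []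

-- ===== PORT B =====
-- Literal port of B: early return when there are no block rows, else strip table
-- first, then a flat double comprehension of lookups.
def get_overlapping_blocks_alt (values : List (List String)) (block_size : Int × Int) : List (List (List String)) :=
  let numRows : Int := PySem.List.len values
  let numCols : Int := PySem.List.len (PySem.List.pyGetD values 0 [])
  let bh := block_size.1
  let bw := block_size.2
  let nrowsOut := numRows - bh + 1
  if nrowsOut ≤ 0 then [] else
  let ncolsOut := numCols - bw + 1
  let strips := values.map (fun rowVals =>
    (PySem.List.pyRange 0 ncolsOut 1).map (fun c =>
      PySem.List.slice rowVals (some c) (some (c + bw))))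
  (PySem.List.pyRange 0 nrowsOut 1).flatMap (fun row =>
    (PySem.List.pyRange 0 ncolsOut 1).map (fun col =>
      (PySem.List.pyRange row (row + bh) 1).map (fun r =>
        PySem.List.pyGetD (PySem.List.pyGetD strips r []) col [])))

-- ===== PRECONDITION & SPEC =====
-- Pre_ excludes only values = [], on which Python A raises IndexError at values[0].
def Pre_get_overlapping_blocks (values : List (List String)) (block_size : Int × Int) : Prop := values ≠ []
instance (values : List (List String)) (block_size : Int × Int) : Decidable (Pre_get_overlapping_blocks values block_size) := by unfold Pre_get_overlapping_blocks; infer_instance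

def pvWitness_get_overlapping_blocks : List (List String) × (Int × Int) := ([["a", "b"], ["c", "d"]], (1, 2))

def Spec_get_overlapping_blocks (values : List (List String)) (block_size : Int × Int) (out : List (List (List String))) : Prop := out = get_overlapping_blocks_alt values block_size
instance (values : List (List String)) (block_size : Int × Int) (out : List (List (List String))) : Decidable (Spec_get_overlapping_blocks values block_size out) := by unfold Spec_get_overlapping_blocks; infer_instance

-- ===== CLAIM (what is proved, stated in full; the proofs are below) =====
def Claim_equal_get_overlapping_blocks : Prop := ∀ (values : List (List String)) (block_size : Int × Int), Dom_get_overlapping_blocks values block_size → Pre_get_overlapping_blocks values block_size → Spec_get_overlapping_blocks values block_size (get_overlapping_blocks values block_size)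

-- ===== LEMMAS AND PROOFS =====
-- The shared inner value: for admissible row/col/r, B's table lookup equals A's direct slice.
theorem pv_lookup_eq_slice (values : List (List String)) (bw ncolsOut : Int) (r col : Int)
    (hr0 : 0 ≤ r) (hrlen : r < (values.length : Int))
    (hc0 : 0 ≤ col) (hclen : col < ncolsOut) :
    PySem.List.pyGetD (PySem.List.pyGetD
        (values.map (fun rowVals => (PySem.List.pyRange 0 ncolsOut 1).map (fun c =>
          PySem.List.slice rowVals (some c) (some (c + bw))))) r []) col []
      = PySem.List.slice (PySem.List.pyGetD values r []) (some col) (some (col + bw)) := by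
  rw [PySem.List.pyGetD_eq_getElem _ _ hr0 (by simpa using hrlen),
      PySem.List.pyGetD_eq_getElem _ _ hr0 hrlen]
  rw [List.getElem_map]
  rw [PySem.List.pyGetD_map_pyRange_of_nonneg _ _ _ _ hc0 hclen]

theorem get_overlapping_blocks_eq (values : List (List String)) (block_size : Int × Int) :
    Pre_get_overlapping_blocks values block_size →
    get_overlapping_blocks values block_size = get_overlapping_blocks_alt values block_size := by
  intro _
  unfold get_overlapping_blocks get_overlapping_blocks_alt
  by_cases hnr : (PySem.List.len values) - block_size.1 + 1 ≤ 0
  · simp only [hnr, if_true, PySem.List.pyRange_one_eq_nil hnr, List.foldl_nil]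
  · simp only [hnr, if_false]
    simp only [PySem.List.foldl_append_singleton_eq_map, PySem.List.foldl_append_eq_flatMap,
      List.nil_append]
    apply List.flatMap_congr
    intro row hrow
    rw [PySem.List.mem_pyRange_one] at hrow
    apply List.map_congr_left
    intro col hcol
    rw [PySem.List.mem_pyRange_one] at hcol
    apply List.map_congr_left
    intro r hr
    rw [PySem.List.mem_pyRange_one] at hr
    exact (pv_lookup_eq_slice values block_size.2 _ r col (le_trans hrow.1 hr.1)
      (by simp only [PySem.List.len_eq] at hrow hr ⊢; omega) hcol.1 hcol.2).symm

-- ===== VERDICT (by name: the statement is the Claim_ definition above) =====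
theorem get_overlapping_blocks_spec : Claim_equal_get_overlapping_blocks := by
  intro values block_size _ hpre
  unfold Spec_get_overlapping_blocks
  exact get_overlapping_blocks_eq values block_size hpre
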